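-- pv_equiv track=rewrite | github.com/JaneChun/algorithm | 프로그래머스/3/150367. 표현 가능한 이진트리/표현 가능한 이진트리.py | add_padding
-- ===== SOURCE A (Python) =====
-- def add_padding(binary):
--     i = 1
--     target_len = 1
--     cur_len = len(binary)
--
--     while True:
--         target_len = 2 ** i - 1 # 1, 3, 7, 15, 31...
--         if cur_len <= target_len:
--             break
--         i += 1
--
--     padding_len = target_len - cur_len
--
--     return '0' * padding_len + binary # 포화이진트리로 만들기 위해 부족한 개수만큼 0을 더해서 반환
-- ===== SOURCE B (Python) =====
-- def add_padding(binary):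
--     cur = len(binary)
--     target = (1 << max(1, cur.bit_length())) - 1
--     return '0' * (target - cur) + binary
-- ===== Notes on version B (the rewrite author's own statement) =====
-- stated objective: simpler
-- what changed: Replaces the trial loop over full-tree sizes 2^i-1 with a closed-form target length computed from the bit length of len(binary), with a floor at 2 matching the loop starting at i=1.
import Mathlib
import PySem

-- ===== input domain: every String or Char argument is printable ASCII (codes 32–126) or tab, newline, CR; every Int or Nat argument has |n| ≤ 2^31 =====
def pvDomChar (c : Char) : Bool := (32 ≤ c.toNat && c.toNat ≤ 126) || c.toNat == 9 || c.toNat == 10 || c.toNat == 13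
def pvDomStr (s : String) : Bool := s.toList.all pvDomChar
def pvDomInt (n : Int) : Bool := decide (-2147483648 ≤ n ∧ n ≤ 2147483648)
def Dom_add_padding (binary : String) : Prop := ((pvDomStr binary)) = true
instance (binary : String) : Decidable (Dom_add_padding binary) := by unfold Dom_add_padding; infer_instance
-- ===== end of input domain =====

-- B replaces A's search loop by a closed-form target length from the bit length of len(binary): simpler, no loop.

-- ===== PORT A =====
-- the 'while True' loop: returns target_len = 2^i - 1 for the first i ≥ start with cur ≤ 2^i - 1
def addPadLoop (cur i : Nat) : Nat :=
  if cur ≤ 2 ^ i - 1 then 2 ^ i - 1 else addPadLoop cur (i + 1)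
termination_by cur - i
decreasing_by
  have h2 : i < 2 ^ i := Nat.lt_two_pow_self
  omega

def add_padding (binary : String) : String :=
  let cur_len := binary.toList.length
  let target_len := addPadLoop cur_len 1
  String.mk (List.replicate (target_len - cur_len) '0' ++ binary.toList)

-- ===== PORT B =====
-- int.bit_length
def bitLen : Nat → Nat
  | 0 => 0
  | n + 1 => bitLen ((n + 1) / 2) + 1

def add_padding_alt (binary : String) : String :=
  let cur := binary.toList.length
  let target := (1 <<< max 1 (bitLen cur)) - 1
  String.mk (List.replicate (target - cur) '0' ++ binary.toList)

-- ===== PRECONDITION & SPEC =====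
def Spec_add_padding (binary : String) (out : String) : Prop := out = add_padding_alt binary
instance (binary : String) (out : String) : Decidable (Spec_add_padding binary out) := by unfold Spec_add_padding; infer_instance

-- ===== CLAIM (what is proved, stated in full; the proofs are below) =====
def Claim_equal_add_padding : Prop := ∀ (binary : String), Dom_add_padding binary → Spec_add_padding binary (add_padding binary)

-- ===== LEMMAS AND PROOFS =====
theorem bitLen_lt (n : Nat) : n < 2 ^ bitLen n := by
  induction n using Nat.strong_induction_on with
  | _ n ih =>
    match n with
    | 0 => simp [bitLen]
    | m + 1 =>
      have ih2 := ih ((m + 1) / 2) (by omega)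
      simp only [bitLen, pow_succ]
      omega

theorem bitLen_pos (n : Nat) (h : 0 < n) : 1 ≤ bitLen n := by
  match n with
  | m + 1 => simp [bitLen]

theorem bitLen_le (n : Nat) (h : 0 < n) : 2 ^ (bitLen n - 1) ≤ n := by
  induction n using Nat.strong_induction_on with
  | _ n ih =>
    match n with
    | m + 1 =>
      by_cases h0 : (m + 1) / 2 = 0
      · have hm : m = 0 := by omega
        subst hm; simp [bitLen]
      · have ih2 := ih ((m + 1) / 2) (by omega) (by omega)
        have hp := bitLen_pos ((m + 1) / 2) (by omega)
        simp only [bitLen, Nat.add_sub_cancel]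
        calc 2 ^ bitLen ((m + 1) / 2)
            = 2 * 2 ^ (bitLen ((m + 1) / 2) - 1) := by
              rw [← pow_succ']
              congr 1
              omega
          _ ≤ 2 * ((m + 1) / 2) := by omega
          _ ≤ m + 1 := by omega

theorem loop_eq_aux (n k : Nat) (hub : n ≤ 2 ^ k - 1)
    (hlb : ∀ j, 1 ≤ j → j < k → 2 ^ j - 1 < n) :
    ∀ d i, 1 ≤ i → i ≤ k → k - i = d → addPadLoop n i = 2 ^ k - 1 := by
  intro d
  induction d with
  | zero =>
    intro i hi1 hik hd
    have : i = k := by omega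
    subst this
    rw [addPadLoop, if_pos hub]
  | succ d ih =>
    intro i hi1 hik hd
    have hik' : i < k := by omega
    have hlt := hlb i hi1 hik'
    rw [addPadLoop, if_neg (by omega)]
    exact ih (i + 1) (by omega) (by omega) (by omega)

theorem loop_closed (n : Nat) : addPadLoop n 1 = 2 ^ max 1 (bitLen n) - 1 := by
  set k := max 1 (bitLen n) with hk
  have hk1 : 1 ≤ k := le_max_left _ _
  have hub : n ≤ 2 ^ k - 1 := by
    have h1 := bitLen_lt n
    have h2 : 2 ^ bitLen n ≤ 2 ^ k := Nat.pow_le_pow_right (by omega) (le_max_right _ _)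
    omega
  have hlb : ∀ j, 1 ≤ j → j < k → 2 ^ j - 1 < n := by
    intro j hj1 hjk
    by_cases hn : n = 0
    · subst hn; simp [bitLen, hk] at hjk; omega
    · have hp := bitLen_pos n (by omega)
      have hkb : k = bitLen n := by omega
      have h1 : 2 ^ j ≤ 2 ^ (bitLen n - 1) := Nat.pow_le_pow_right (by omega) (by omega)
      have h2 := bitLen_le n (by omega)
      have h3 : 0 < 2 ^ j := Nat.two_pow_pos j
      omega
  exact loop_eq_aux n k hub hlb (k - 1) 1 (le_refl 1) hk1 rfl

-- ===== VERDICT (by name: the statement is the Claim_ definition above) =====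
theorem add_padding_spec : Claim_equal_add_padding := by
  intro binary _
  show add_padding binary = add_padding_alt binary
  simp only [add_padding, add_padding_alt, loop_closed, Nat.one_shiftLeft]
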